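-- pv_equiv track=rewrite | github.com/pypi-data/pypi-mirror-381 | packages/pyRugged/pyrugged-1.1.4.tar.gz/pyrugged-1.1.4/tests/intersection/duvenhage/test_min_max_tree_tile.py | create_ref_neighbors
-- ===== SOURCE A (Python) =====
-- def create_ref_neighbors(row: int, column: int, nb_rows: int, nb_columns: int, stages: int):
--     """
--     create neighbors for tests' references
--     """
--     # poor man identification of neighbors cells merged together with specified cell
--     # this identification is intentionally independent of the MinMaxTreeTile class,
--     # for testing purposes
--     r_min = row
--     r_n = 1
--     r_mask = -1
--     c_min = column
--     c_n = 1
--     c_mask = -1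
--
--     merge_columns = True
--     for _ in range(stages):
--         if merge_columns:
--             c_mask = c_mask << 1
--             c_min = c_min & c_mask
--             c_n = c_n * 2
--         else:
--             r_mask = r_mask << 1
--             r_min = r_min & r_mask
--             r_n = r_n * 2
--         merge_columns = not merge_columns
--
--     return r_min, min(r_min + r_n, nb_rows), c_min, min(c_min + c_n, nb_columns)
-- ===== SOURCE B (Python) =====
-- def create_ref_neighbors(row: int, column: int, nb_rows: int, nb_columns: int, stages: int):
--     """
--     create neighbors for tests' references
--     """
--     # closed form: columns are merged on even loop turns, rows on odd ones,
--     # so after `stages` turns there are ceil(stages/2) column merges and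
--     # floor(stages/2) row merges (0 each when stages <= 0); clearing the low
--     # bits of an int equals subtracting its remainder modulo the cell size.
--     cols = max(stages + 1, 0) // 2
--     rows = max(stages, 0) // 2
--     c_size = 2 ** cols
--     r_size = 2 ** rows
--     c_min = column - column % c_size
--     r_min = row - row % r_size
--     return r_min, min(r_min + r_size, nb_rows), c_min, min(c_min + c_size, nb_columns)
-- ===== Notes on version B (the rewrite author's own statement) =====
-- stated objective: faster
-- what changed: Replaces the alternating bit-shift/mask merging loop by a closed form: the number of column merges is ceil(stages/2) and of row merges floor(stages/2) (clamped at 0), and clearing the low bits of an int equals subtracting its remainder modulo the cell size, so no loop and no bit operations remain.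
import Mathlib
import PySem

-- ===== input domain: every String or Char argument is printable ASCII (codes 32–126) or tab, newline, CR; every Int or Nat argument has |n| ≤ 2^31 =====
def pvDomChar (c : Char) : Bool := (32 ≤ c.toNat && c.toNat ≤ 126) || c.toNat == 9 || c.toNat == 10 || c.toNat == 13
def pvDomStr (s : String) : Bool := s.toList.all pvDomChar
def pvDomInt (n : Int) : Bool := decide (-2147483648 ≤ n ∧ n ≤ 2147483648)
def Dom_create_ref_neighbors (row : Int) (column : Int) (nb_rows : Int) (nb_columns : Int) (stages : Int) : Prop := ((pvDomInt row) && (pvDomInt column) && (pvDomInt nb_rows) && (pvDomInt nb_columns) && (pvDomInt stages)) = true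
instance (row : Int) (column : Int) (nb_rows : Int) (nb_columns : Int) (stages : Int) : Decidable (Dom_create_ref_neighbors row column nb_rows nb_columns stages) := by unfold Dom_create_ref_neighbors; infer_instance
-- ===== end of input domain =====

-- B replaces A's alternating shift/mask merging loop by a closed form over the merge counts
-- ceil(stages/2) and floor(stages/2), with the bit-masking expressed arithmetically (objective: simpler).

-- ===== PORT A =====
-- the for-loop of A as structural recursion on the iteration count;
-- state = (r_min, r_n, r_mask, c_min, c_n, c_mask, merge_columns)
def createRefNeighborsLoop : Nat → (Int × Int × Int × Int × Int × Int × Bool) → (Int × Int × Int × Int × Int × Int × Bool)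
  | 0, st => st
  | n + 1, (r_min, r_n, r_mask, c_min, c_n, c_mask, mc) =>
      if mc then
        -- c_mask = c_mask << 1; c_min = c_min & c_mask; c_n = c_n * 2
        createRefNeighborsLoop n (r_min, r_n, r_mask, Int.land c_min (c_mask <<< (1 : Int)), c_n * 2, c_mask <<< (1 : Int), !mc)
      else
        -- r_mask = r_mask << 1; r_min = r_min & r_mask; r_n = r_n * 2
        createRefNeighborsLoop n (Int.land r_min (r_mask <<< (1 : Int)), r_n * 2, r_mask <<< (1 : Int), c_min, c_n, c_mask, !mc)

def create_ref_neighbors (row : Int) (column : Int) (nb_rows : Int) (nb_columns : Int) (stages : Int) : Int × Int × Int × Int :=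
  -- for _ in range(stages): stages.toNat iterations
  let st := createRefNeighborsLoop stages.toNat (row, 1, -1, column, 1, -1, true)
  (st.1, min (st.1 + st.2.1) nb_rows, st.2.2.2.1, min (st.2.2.2.1 + st.2.2.2.2.1) nb_columns)

-- ===== PORT B =====
def create_ref_neighbors_alt (row : Int) (column : Int) (nb_rows : Int) (nb_columns : Int) (stages : Int) : Int × Int × Int × Int :=
  let cols := PySem.Int.floordiv (max (stages + 1) 0) 2
  let rows := PySem.Int.floordiv (max stages 0) 2
  -- 2 ** cols with cols ≥ 0: exact as 2 ^ cols.toNat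
  let c_size := (2 : Int) ^ cols.toNat
  let r_size := (2 : Int) ^ rows.toNat
  let c_min := column - PySem.Int.mod column c_size
  let r_min := row - PySem.Int.mod row r_size
  (r_min, min (r_min + r_size) nb_rows, c_min, min (c_min + c_size) nb_columns)

-- ===== PRECONDITION & SPEC =====
def Spec_create_ref_neighbors (row : Int) (column : Int) (nb_rows : Int) (nb_columns : Int) (stages : Int) (out : Int × Int × Int × Int) : Prop := out = create_ref_neighbors_alt row column nb_rows nb_columns stages
instance (row : Int) (column : Int) (nb_rows : Int) (nb_columns : Int) (stages : Int) (out : Int × Int × Int × Int) : Decidable (Spec_create_ref_neighbors row column nb_rows nb_columns stages out) := by unfold Spec_create_ref_neighbors; infer_instance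

-- ===== CLAIM (what is proved, stated in full; the proofs are below) =====
def Claim_equal_create_ref_neighbors : Prop := ∀ (row : Int) (column : Int) (nb_rows : Int) (nb_columns : Int) (stages : Int), Dom_create_ref_neighbors row column nb_rows nb_columns stages → Spec_create_ref_neighbors row column nb_rows nb_columns stages (create_ref_neighbors row column nb_rows nb_columns stages)

-- ===== LEMMAS AND PROOFS =====

-- clearing the k low bits of a natural number: ldiff with the low mask
lemma nat_ldiff_low_mask (m k : Nat) : Nat.ldiff m (2 ^ k - 1) = m / 2 ^ k * 2 ^ k := by
  apply Nat.eq_of_testBit_eq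
  intro i
  rw [Nat.testBit_ldiff, Nat.testBit_two_pow_sub_one, Nat.testBit_mul_two_pow, Nat.testBit_div_two_pow]
  by_cases h : k ≤ i
  · simp [h, Nat.sub_add_cancel h, Nat.not_lt.mpr h]
  · simp [h, Nat.lt_of_not_le h]

-- setting the k low bits of a natural number
lemma nat_or_low_mask (m k : Nat) : m ||| (2 ^ k - 1) = m / 2 ^ k * 2 ^ k + (2 ^ k - 1) := by
  have h1 : m ||| (2 ^ k - 1) = (m / 2 ^ k) <<< k ||| (2 ^ k - 1) := by
    apply Nat.eq_of_testBit_eq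
    intro i
    rw [Nat.testBit_or, Nat.testBit_or, Nat.testBit_two_pow_sub_one, Nat.testBit_shiftLeft,
      Nat.testBit_div_two_pow]
    by_cases h : k ≤ i
    · simp [h, Nat.sub_add_cancel h, Nat.not_lt.mpr h]
    · simp [h, Nat.lt_of_not_le h]
  rw [h1, ← Nat.shiftLeft_add_eq_or_of_lt (Nat.sub_lt (Nat.two_pow_pos k) one_pos) _,
    Nat.shiftLeft_eq]

-- the central bridge: x & -(2^k) clears the k low bits, i.e. subtracts x % 2^k
lemma land_neg_two_pow (x : Int) (k : Nat) : Int.land x (-(2 ^ k)) = x - x % 2 ^ k := by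
  have h1 : (1 : Nat) ≤ 2 ^ k := Nat.one_le_two_pow
  have hmask : (-(2 ^ k : Int)) = Int.negSucc (2 ^ k - 1) := by
    rw [Int.negSucc_eq, Nat.cast_sub h1]
    push_cast
    ring
  cases x with
  | ofNat m =>
      have hmI : (2 : Int) ^ k * ((m / 2 ^ k : Nat) : Int) + ((m % 2 ^ k : Nat) : Int) = (m : Int) := by
        exact_mod_cast Nat.div_add_mod m (2 ^ k)
      have hmod : ((m : Int)) % ((2 : Int) ^ k) = ((m % 2 ^ k : Nat) : Int) := by push_cast; rfl
      rw [hmask]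
      show ((Nat.ldiff m (2 ^ k - 1) : Nat) : Int) = ((m : Nat) : Int) - ((m : Nat) : Int) % 2 ^ k
      rw [nat_ldiff_low_mask, hmod, Nat.cast_mul, Nat.cast_pow, Nat.cast_ofNat]
      linear_combination hmI
  | negSucc m =>
      have hmI : (2 : Int) ^ k * ((m / 2 ^ k : Nat) : Int) + ((m % 2 ^ k : Nat) : Int) = (m : Int) := by
        exact_mod_cast Nat.div_add_mod m (2 ^ k)
      have ht : ((m % 2 ^ k : Nat) : Int) < 2 ^ k := by
        exact_mod_cast Nat.mod_lt m (Nat.two_pow_pos k)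
      have ht0 : (0 : Int) ≤ ((m % 2 ^ k : Nat) : Int) := Int.natCast_nonneg _
      rw [hmask]
      show Int.negSucc (m ||| (2 ^ k - 1)) = Int.negSucc m - Int.negSucc m % 2 ^ k
      have hx : Int.negSucc m
          = ((2 ^ k - 1 - (m % 2 ^ k : Nat) : Int)) + 2 ^ k * (-(((m / 2 ^ k : Nat) : Int) + 1)) := by
        rw [Int.negSucc_eq]
        linear_combination hmI
      have hemod : Int.negSucc m % 2 ^ k = (2 ^ k - 1 - (m % 2 ^ k : Nat) : Int) := by
        rw [hx, Int.add_mul_emod_self_left]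
        apply Int.emod_eq_of_lt <;> omega
      rw [hemod, nat_or_low_mask, Int.negSucc_eq, Int.negSucc_eq, Nat.cast_add,
        Nat.cast_mul, Nat.cast_pow, Nat.cast_ofNat, Nat.cast_sub h1, Nat.cast_pow, Nat.cast_ofNat,
        Nat.cast_one]
      linear_combination -hmI

-- merging once more: from the 2^a-aligned cell to the 2^(a+1)-aligned cell
lemma merge_step (x : Int) (a : Nat) :
    Int.land (x - x % 2 ^ a) (-(2 ^ (a + 1))) = x - x % 2 ^ (a + 1) := by
  rw [land_neg_two_pow]
  have hpa : (0 : Int) < 2 ^ a := by positivity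
  have hpa1 : (0 : Int) < 2 ^ (a + 1) := by positivity
  have hd : (2 ^ a : Int) ∣ 2 ^ (a + 1) := pow_dvd_pow 2 (Nat.le_succ a)
  have h1 : x % 2 ^ (a + 1) % 2 ^ a = x % 2 ^ a := Int.emod_emod_of_dvd x hd
  set z := x % 2 ^ (a + 1) with hz
  set t := x % 2 ^ a with htdef
  have hz0 : 0 ≤ z := Int.emod_nonneg x (by positivity)
  have hz1 : z < 2 ^ (a + 1) := Int.emod_lt_of_pos x hpa1
  have ht0 : 0 ≤ t := Int.emod_nonneg x (by positivity)
  have ht1 : t < 2 ^ a := Int.emod_lt_of_pos x hpa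
  have htz : t ≤ z := by
    have hq0 : 0 ≤ z / 2 ^ a := Int.ediv_nonneg hz0 (le_of_lt hpa)
    have hdm : z % 2 ^ a + 2 ^ a * (z / 2 ^ a) = z := Int.emod_add_ediv z (2 ^ a)
    have hmul : 0 ≤ 2 ^ a * (z / 2 ^ a) := mul_nonneg (le_of_lt hpa) hq0
    rw [h1] at hdm
    omega
  have h2 : (x - t) % 2 ^ (a + 1) = z - t := by
    rw [Int.sub_emod, ← hz, Int.emod_eq_of_lt ht0 (lt_trans ht1 (by omega)),
      Int.emod_eq_of_lt (by omega) (by omega)]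
  omega

-- the canonical state after ar row merges and ac column merges
def refState (row column : Int) (ar ac : Nat) (mc : Bool) : Int × Int × Int × Int × Int × Int × Bool :=
  (row - row % 2 ^ ar, 2 ^ ar, -(2 ^ ar), column - column % 2 ^ ac, 2 ^ ac, -(2 ^ ac), mc)

lemma refState_congr (row column : Int) {a1 a2 c1 c2 : Nat} {m1 m2 : Bool}
    (ha : a1 = a2) (hc : c1 = c2) (hm : m1 = m2) :
    refState row column a1 c1 m1 = refState row column a2 c2 m2 := by
  rw [ha, hc, hm]

-- mask shift: shifting the aligned mask left once
lemma shift_mask (a : Nat) : (-(2 ^ a : Int)) <<< (1 : Int) = -(2 ^ (a + 1)) := by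
  have h := Int.shiftLeft_eq_mul_pow (-(2 ^ a : Int)) 1
  push_cast at h
  rw [h]; ring

-- one loop turn on a canonical state merges the active dimension once
lemma step_true (row column : Int) (ar ac : Nat) (n : Nat) :
    createRefNeighborsLoop (n + 1) (refState row column ar ac true)
      = createRefNeighborsLoop n (refState row column ar (ac + 1) false) := by
  simp only [createRefNeighborsLoop, refState, if_true, Bool.not_true]
  rw [shift_mask, merge_step, pow_succ]

lemma step_false (row column : Int) (ar ac : Nat) (n : Nat) :
    createRefNeighborsLoop (n + 1) (refState row column ar ac false)
      = createRefNeighborsLoop n (refState row column (ar + 1) ac true) := by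
  simp only [createRefNeighborsLoop, refState, Bool.false_eq_true, if_false, Bool.not_false]
  rw [shift_mask, merge_step, pow_succ]

-- the loop invariant: n further turns add ceil/floor(n/2) merges depending on whose turn it is
lemma loop_char (n : Nat) : ∀ (row column : Int) (ar ac : Nat) (mc : Bool),
    createRefNeighborsLoop n (refState row column ar ac mc)
      = refState row column (ar + (cond mc (n / 2) ((n + 1) / 2)))
          (ac + (cond mc ((n + 1) / 2) (n / 2))) (cond (n % 2 == 0) mc (!mc)) := by
  induction n with
  | zero => intro row column ar ac mc; simp [createRefNeighborsLoop]
  | succ n ih =>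
      intro row column ar ac mc
      cases mc with
      | true =>
          rw [step_true, ih]
          simp only [Bool.cond_false, Bool.cond_true, Bool.not_false, Bool.not_true]
          rcases Nat.even_or_odd n with h | h
          · have hn : n % 2 = 0 := Nat.even_iff.mp h
            have hn1 : (n + 1) % 2 = 1 := by omega
            rw [hn, hn1]
            exact refState_congr row column (by omega) (by omega) (by rfl)
          · have hn : n % 2 = 1 := Nat.odd_iff.mp h
            have hn1 : (n + 1) % 2 = 0 := by omega
            rw [hn, hn1]
            exact refState_congr row column (by omega) (by omega) (by rfl)
      | false =>
          rw [step_false, ih]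
          simp only [Bool.cond_false, Bool.cond_true, Bool.not_false, Bool.not_true]
          rcases Nat.even_or_odd n with h | h
          · have hn : n % 2 = 0 := Nat.even_iff.mp h
            have hn1 : (n + 1) % 2 = 1 := by omega
            rw [hn, hn1]
            exact refState_congr row column (by omega) (by omega) (by rfl)
          · have hn : n % 2 = 1 := Nat.odd_iff.mp h
            have hn1 : (n + 1) % 2 = 0 := by omega
            rw [hn, hn1]
            exact refState_congr row column (by omega) (by omega) (by rfl)

-- B's merge counts agree with the loop's
lemma cols_toNat (stages : Int) : (PySem.Int.floordiv (max (stages + 1) 0) 2).toNat = (stages.toNat + 1) / 2 := by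
  rw [PySem.Int.floordiv_eq_ediv_of_pos (by norm_num)]
  omega

lemma rows_toNat (stages : Int) : (PySem.Int.floordiv (max stages 0) 2).toNat = stages.toNat / 2 := by
  rw [PySem.Int.floordiv_eq_ediv_of_pos (by norm_num)]
  omega

-- ===== VERDICT (by name: the statement is the Claim_ definition above) =====
theorem create_ref_neighbors_spec : Claim_equal_create_ref_neighbors := by
  intro row column nb_rows nb_columns stages _
  unfold Spec_create_ref_neighbors create_ref_neighbors create_ref_neighbors_alt
  have hinit : ((row, 1, -1, column, 1, -1, true) : Int × Int × Int × Int × Int × Int × Bool)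
      = refState row column 0 0 true := by
    simp [refState]
  rw [hinit, loop_char]
  simp only [refState, Nat.zero_add, Bool.cond_true, cols_toNat, rows_toNat]
  rw [show ((stages + 1).toNat) / 2 = (stages.toNat + 1) / 2 from by omega,
    PySem.Int.mod_eq_emod_of_pos (a := row) (b := (2 : Int) ^ (stages.toNat / 2)) (by positivity),
    PySem.Int.mod_eq_emod_of_pos (a := column) (b := (2 : Int) ^ ((stages.toNat + 1) / 2)) (by positivity)]
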